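-- pv_equiv track=rewrite | github.com/jnillius/FlagGame | main.py | extendGuess
-- ===== SOURCE A (Python) =====
-- def extendGuess(guess, matching_countries):
--     len_shortest_country = len(min(matching_countries, key=len))
--     len_guess = len(guess)
--     if len_shortest_country == len_guess:
--         return guess
--     extend_guess = guess
--     for i in range(len_guess, len_shortest_country):
--         i_char = matching_countries[0][i]
--         for j in range(1, len(matching_countries)):
--             j_char = matching_countries[j][i]
--             if not i_char == j_char:
--                 return extend_guess
--         extend_guess += i_char
--     return extend_guess
-- ===== SOURCE B (Python) =====
-- def _commonPrefix(x, y):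
--     if x and y and x[0] == y[0]:
--         return x[0] + _commonPrefix(x[1:], y[1:])
--     return ""
--
--
-- def extendGuess(guess, matching_countries):
--     shortest = len(min(matching_countries, key=len))
--     off = len(guess)
--     common = matching_countries[0][off:shortest]
--     for c in matching_countries[1:]:
--         common = _commonPrefix(common, c[off:shortest])
--     return guess + common
-- ===== Notes on version B (the rewrite author's own statement) =====
-- stated objective: alternative
-- what changed: Replaces A's column-by-column index scan (outer loop over character positions, inner loop over countries with early return) by a row-by-row fold: slice each country's tail segment once and shorten a running common prefix per country.
import Mathlib
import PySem

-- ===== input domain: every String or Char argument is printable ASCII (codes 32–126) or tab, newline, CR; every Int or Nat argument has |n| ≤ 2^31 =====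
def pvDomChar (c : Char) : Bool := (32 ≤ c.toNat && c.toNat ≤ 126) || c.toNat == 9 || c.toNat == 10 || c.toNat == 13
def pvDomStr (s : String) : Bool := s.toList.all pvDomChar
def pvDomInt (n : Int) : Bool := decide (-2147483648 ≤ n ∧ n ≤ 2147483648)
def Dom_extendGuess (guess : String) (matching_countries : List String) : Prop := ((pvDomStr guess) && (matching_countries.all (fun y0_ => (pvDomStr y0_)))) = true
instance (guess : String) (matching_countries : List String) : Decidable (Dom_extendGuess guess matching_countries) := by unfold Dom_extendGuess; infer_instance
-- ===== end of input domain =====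

-- B replaces A's column-by-column index scan with a row-by-row fold that shortens a running
-- common prefix of the countries' tail segments (objective: alternative decomposition, same cost).

-- ===== PORT A =====
-- inner 'for j in range(1, len(matching_countries))' loop: true iff no mismatch (no early return)
def pvInnerA (cs : List String) (i : Int) (iChar : Char) : Bool :=
  (PySem.List.pyRange 1 (cs.length : Int)).all (fun j =>
    match PySem.List.pyGet? cs j with
    | some cj =>
      match PySem.Str.pyGet? cj i with
      | some jChar => jChar == iChar
      | none => false          -- IndexError: unreachable, i < length of every country
    | none => false)           -- IndexError: unreachable, 1 ≤ j < len(cs)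

-- outer 'for i in range(len_guess, len_shortest)' loop with early return of extend_guess
def pvOuterA (cs : List String) (idxs : List Int) (acc : List Char) : List Char :=
  match idxs with
  | [] => acc
  | i :: is =>
    match PySem.List.pyGet? cs 0 with
    | none => acc              -- unreachable on Pre_ (cs nonempty)
    | some c0 =>
      match PySem.Str.pyGet? c0 i with
      | none => acc            -- unreachable, i < len_shortest ≤ len(cs[0])
      | some iChar =>
        if pvInnerA cs i iChar then pvOuterA cs is (acc ++ [iChar]) else acc

def extendGuess (guess : String) (matching_countries : List String) : String :=
  match PySem.List.min? matching_countries (fun c => PySem.Str.len c) with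
  | none => ""                 -- min([]) raises ValueError; excluded by Pre_
  | some m =>
    let lenShortest := PySem.Str.len m
    let lenGuess := PySem.Str.len guess
    if lenShortest == lenGuess then guess
    else String.ofList (pvOuterA matching_countries (PySem.List.pyRange lenGuess lenShortest) guess.toList)

-- ===== PORT B =====
-- _commonPrefix of Source B, on the code-point lists
def pvCommonPrefix : List Char → List Char → List Char
  | a :: x, b :: y => if a == b then a :: pvCommonPrefix x y else []
  | _, _ => []

def extendGuess_alt (guess : String) (matching_countries : List String) : String :=
  match PySem.List.min? matching_countries (fun c => PySem.Str.len c) with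
  | none => ""                 -- min([]) raises ValueError; excluded by Pre_
  | some m =>
    let shortest := PySem.Str.len m
    let off := PySem.Str.len guess
    match matching_countries with
    | [] => ""                 -- unreachable (min? returned some)
    | c0 :: rest =>
      let common := rest.foldl
        (fun com c => pvCommonPrefix com (PySem.List.slice c.toList (some off) (some shortest)))
        (PySem.List.slice c0.toList (some off) (some shortest))
      String.ofList (guess.toList ++ common)

-- ===== PRECONDITION & SPEC =====
-- Pre_ excludes only the empty country list, on which Python's min(...) raises ValueError.
def Pre_extendGuess (guess : String) (matching_countries : List String) : Prop :=
  matching_countries ≠ []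
instance (guess : String) (matching_countries : List String) : Decidable (Pre_extendGuess guess matching_countries) := by unfold Pre_extendGuess; infer_instance

def pvWitness_extendGuess : String × List String := ("G", ["Germany", "Georgia", "Greece"])

def Spec_extendGuess (guess : String) (matching_countries : List String) (out : String) : Prop := out = extendGuess_alt guess matching_countries
instance (guess : String) (matching_countries : List String) (out : String) : Decidable (Spec_extendGuess guess matching_countries out) := by unfold Spec_extendGuess; infer_instance

-- ===== CLAIM (what is proved, stated in full; the proofs are below) =====
def Claim_equal_extendGuess : Prop := ∀ (guess : String) (matching_countries : List String), Dom_extendGuess guess matching_countries → Pre_extendGuess guess matching_countries → Spec_extendGuess guess matching_countries (extendGuess guess matching_countries)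

-- ===== LEMMAS AND PROOFS =====

-- the tail segment of country c from column i up to column sh
def pvSeg (sh i : Nat) (c : String) : List Char := (c.toList.drop i).take (sh - i)

theorem pvCP_nil_left (y : List Char) : pvCommonPrefix [] y = [] := by
  cases y <;> rfl

theorem pvFold_nil (ys : List String) (g : String → List Char) :
    ys.foldl (fun com c => pvCommonPrefix com (g c)) [] = [] := by
  induction ys with
  | nil => rfl
  | cons y ys ih => simpa [pvCP_nil_left] using ih

theorem pvFold_cons (ys : List String) (g g' : String → List Char) (ch : Char)
    (h : ∀ c ∈ ys, g c = ch :: g' c) :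
    ∀ x : List Char, ys.foldl (fun com c => pvCommonPrefix com (g c)) (ch :: x)
      = ch :: ys.foldl (fun com c => pvCommonPrefix com (g' c)) x := by
  induction ys with
  | nil => intro x; rfl
  | cons y ys ih =>
    intro x
    have hy := h y (by simp)
    simp only [List.foldl_cons, hy, pvCommonPrefix, BEq.rfl, if_true]
    exact ih (fun c hc => h c (by simp [hc])) _
  
theorem pvFold_mismatch (ys : List String) (g : String → List Char) (ch : Char) :
    ∀ x : List Char, x.head? = some ch → (∃ c ∈ ys, (g c).head? ≠ some ch) →
    ys.foldl (fun com c => pvCommonPrefix com (g c)) x = [] := by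
  induction ys with
  | nil => intro x _ h; simp at h
  | cons y ys ih =>
    intro x hx h
    obtain ⟨xt, rfl⟩ : ∃ xt, x = ch :: xt := by
      cases x with
      | nil => simp at hx
      | cons a t =>
        simp only [List.head?_cons, Option.some_inj] at hx
        exact ⟨t, by rw [hx]⟩
    by_cases hy : (g y).head? = some ch
    · obtain ⟨yt, hyt⟩ : ∃ yt, g y = ch :: yt := by
        cases hgy : g y with
        | nil => rw [hgy] at hy; simp at hy
        | cons b t => rw [hgy] at hy; simp at hy; exact ⟨t, by rw [hy]⟩
      have hmem : ∃ c ∈ ys, (g c).head? ≠ some ch := by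
        rcases h with ⟨c, hc, hne⟩
        rcases List.mem_cons.mp hc with rfl | hc'
        · exact absurd hy hne
        · exact ⟨c, hc', hne⟩
      simp only [List.foldl_cons, hyt, pvCommonPrefix, BEq.rfl, if_true]
      exact ih _ rfl hmem
    · have : pvCommonPrefix (ch :: xt) (g y) = [] := by
        cases hgy : g y with
        | nil => rfl
        | cons b t =>
          rw [hgy] at hy
          simp only [List.head?_cons] at hy
          have : (ch == b) = false := by
            cases hcb : ch == b
            · rfl
            · exact absurd (by simpa using (beq_iff_eq.mp hcb).symm) hy
          simp [pvCommonPrefix, this]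
      simp only [List.foldl_cons, this]
      exact pvFold_nil ys g

theorem pvSeg_cons (sh i : Nat) (c : String) (hi : i < sh) (hc : sh ≤ c.toList.length) :
    pvSeg sh i c = c.toList[i]'(by omega) :: pvSeg sh (i + 1) c := by
  unfold pvSeg
  rw [List.drop_eq_getElem_cons (by omega)]
  have : sh - i = (sh - (i + 1)) + 1 := by omega
  rw [this, List.take_succ_cons]

theorem pvInnerA_eq (cs : List String) (i : Int) (ch : Char) :
    ∀ j : Nat, j ≤ cs.length →
    (PySem.List.pyRange (j : Int) (cs.length : Int)).all (fun jj =>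
      match PySem.List.pyGet? cs jj with
      | some cj =>
        match PySem.Str.pyGet? cj i with
        | some jChar => jChar == ch
        | none => false
      | none => false)
    = (cs.drop j).all (fun c =>
        match PySem.Str.pyGet? c i with
        | some jChar => jChar == ch
        | none => false) := by
  intro j hj
  induction hn : cs.length - j generalizing j with
  | zero =>
    have hj' : j = cs.length := by omega
    subst hj'
    rw [PySem.List.pyRange_one_eq_nil (by omega), List.drop_length]
    rfl
  | succ n ih =>
    have hjlt : j < cs.length := by omega
    rw [PySem.List.pyRange_one_cons (by exact_mod_cast hjlt)]
    have : ((j : Int) + 1) = ((j + 1 : Nat) : Int) := by push_cast; ring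
    rw [this, List.drop_eq_getElem_cons hjlt]
    simp only [List.all_cons, PySem.List.pyGet?_natCast, List.getElem?_eq_getElem hjlt]
    rw [ih (j + 1) (by omega) (by omega)]

theorem pvOuterA_eq (c0 : String) (rest : List String) (sh : Nat)
    (hlen : ∀ c ∈ c0 :: rest, sh ≤ c.toList.length) :
    ∀ i : Nat, i ≤ sh → ∀ acc : List Char,
    pvOuterA (c0 :: rest) (PySem.List.pyRange (i : Int) (sh : Int)) acc
      = acc ++ rest.foldl (fun com c => pvCommonPrefix com (pvSeg sh i c)) (pvSeg sh i c0) := by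
  intro i hi
  induction hn : sh - i generalizing i with
  | zero =>
    intro acc
    rw [PySem.List.pyRange_one_eq_nil (by omega)]
    have hseg : ∀ c : String, pvSeg sh i c = [] := by
      intro c; unfold pvSeg; rw [show sh - i = 0 by omega]; simp
    have hfold : rest.foldl (fun com c => pvCommonPrefix com (pvSeg sh i c)) (pvSeg sh i c0) = [] := by
      rw [hseg c0]
      exact pvFold_nil rest (fun c => pvSeg sh i c)
    rw [hfold]
    simp [pvOuterA]
  | succ n ih =>
    intro acc
    have hilt : i < sh := by omega
    have hc0 : sh ≤ c0.toList.length := hlen c0 (by simp)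
    rw [PySem.List.pyRange_one_cons (by exact_mod_cast hilt)]
    have hstep : ((i : Int) + 1) = ((i + 1 : Nat) : Int) := by push_cast; ring
    set ch := c0.toList[i]'(by omega) with hch
    have hget : PySem.Str.pyGet? c0 (i : Int) = some ch := by
      rw [PySem.Str.pyGet?_natCast, List.getElem?_eq_getElem (by omega)]
    have hinner : pvInnerA (c0 :: rest) (i : Int) ch
        = (c0 :: rest).tail.all (fun c =>
            match PySem.Str.pyGet? c (i : Int) with
            | some jChar => jChar == ch
            | none => false) := by
      unfold pvInnerA
      have := pvInnerA_eq (c0 :: rest) (i : Int) ch 1 (by simp)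
      simpa using this
    simp only [pvOuterA]
    rw [show ((0 : Int) = ((0 : Nat) : Int)) from rfl]
    simp only [PySem.List.pyGet?_natCast, List.getElem?_cons_zero, hget]
    by_cases hall : ∀ c ∈ rest, c.toList[i]? = some ch
    · -- every country matches at column i
      have hinnerT : pvInnerA (c0 :: rest) (i : Int) ch = true := by
        rw [hinner]
        simp only [List.tail_cons, List.all_eq_true]
        intro c hc
        rw [PySem.Str.pyGet?_natCast, hall c hc]
        exact beq_self_eq_true ch
      rw [hinnerT, if_pos rfl, hstep, ih (i + 1) (by omega) (by omega)]
      have hsegc0 : pvSeg sh i c0 = ch :: pvSeg sh (i + 1) c0 := pvSeg_cons sh i c0 hilt hc0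
      have hsegs : ∀ c ∈ rest, pvSeg sh i c = ch :: pvSeg sh (i + 1) c := by
        intro c hc
        have hcl : sh ≤ c.toList.length := hlen c (by simp [hc])
        have := pvSeg_cons sh i c hilt hcl
        rw [this]
        have : c.toList[i]'(by omega) = ch := by
          have := hall c hc
          rwa [List.getElem?_eq_getElem (by omega), Option.some_inj] at this
        rw [this]
      rw [hsegc0, pvFold_cons rest (fun c => pvSeg sh i c) (fun c => pvSeg sh (i + 1) c) ch hsegs]
      simp
    · -- some country mismatches at column i: A stops, B's fold collapses to []
      push Not at hall
      obtain ⟨c, hc, hne⟩ := hall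
      have hcl : sh ≤ c.toList.length := hlen c (by simp [hc])
      have hcin : c.toList[i]? = some (c.toList[i]'(by omega)) := List.getElem?_eq_getElem (by omega)
      have hcne : c.toList[i]'(by omega) ≠ ch := by
        intro h; exact hne (by rw [hcin, h])
      have hinnerF : pvInnerA (c0 :: rest) (i : Int) ch = false := by
        rw [hinner]
        simp only [List.tail_cons]
        refine eq_false_of_ne_true ?_
        intro hT
        rw [List.all_eq_true] at hT
        have := hT c hc
        rw [PySem.Str.pyGet?_natCast, hcin] at this
        exact hcne (by simpa using this)
      rw [hinnerF]
      simp only [Bool.false_eq_true, if_false]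
      have hsegc0 : pvSeg sh i c0 = ch :: pvSeg sh (i + 1) c0 := pvSeg_cons sh i c0 hilt hc0
      rw [pvFold_mismatch rest (fun c => pvSeg sh i c) ch (pvSeg sh i c0)
        (by rw [hsegc0]; rfl)
        ⟨c, hc, by
          show (pvSeg sh i c).head? ≠ some ch
          rw [pvSeg_cons sh i c hilt hcl]
          simpa using hcne⟩]
      simp

-- ===== VERDICT (by name: the statement is the Claim_ definition above) =====
theorem extendGuess_spec : Claim_equal_extendGuess := by
  intro guess cs _ hpre
  unfold Spec_extendGuess extendGuess extendGuess_alt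
  obtain ⟨c0, rest, rfl⟩ : ∃ c0 rest, cs = c0 :: rest := by
    cases cs with
    | nil => exact absurd rfl hpre
    | cons a t => exact ⟨a, t, rfl⟩
  cases hmin : PySem.List.min? (c0 :: rest) (fun c => PySem.Str.len c) with
  | none => simp [PySem.List.min?_eq_none_iff] at hmin
  | some m =>
    simp only []
    set sh := m.toList.length with hsh
    set off := guess.toList.length with hoff
    have hlenm : PySem.Str.len m = (sh : Int) := PySem.Str.len_eq m
    have hleng : PySem.Str.len guess = (off : Int) := PySem.Str.len_eq guess
    have hlen : ∀ c ∈ c0 :: rest, sh ≤ c.toList.length := by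
      intro c hc
      have := PySem.List.min?_isMin hmin c hc
      rw [PySem.Str.len_eq, PySem.Str.len_eq] at this
      exact_mod_cast this
    have hslice : ∀ c : String,
        PySem.List.slice c.toList (some (PySem.Str.len guess)) (some (PySem.Str.len m))
          = pvSeg sh off c := by
      intro c
      rw [hlenm, hleng, PySem.List.slice_natCast]
      rfl
    simp only [hslice]
    by_cases heq : sh = off
    · -- A returns guess immediately; B's segments are empty
      have : (PySem.Str.len m == PySem.Str.len guess) = true := by
        rw [hlenm, hleng, heq]; exact beq_self_eq_true _
      rw [this, if_pos rfl]
      have hseg : ∀ c : String, pvSeg sh off c = [] := by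
        intro c; unfold pvSeg; rw [heq]; simp
      have hfold : rest.foldl (fun com c => pvCommonPrefix com (pvSeg sh off c)) (pvSeg sh off c0) = [] := by
        rw [hseg c0]
        exact pvFold_nil rest (fun c => pvSeg sh off c)
      rw [hfold]
      simp [String.ofList_toList]
    · have : (PySem.Str.len m == PySem.Str.len guess) = false := by
        rw [hlenm, hleng]
        exact beq_eq_false_iff_ne.mpr (by exact_mod_cast heq)
      rw [this]
      simp only [Bool.false_eq_true, if_false]
      rw [hlenm, hleng]
      by_cases hle : off ≤ sh
      · rw [pvOuterA_eq c0 rest sh hlen off hle guess.toList]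
      · -- guess longer than the shortest country: both sides are guess's characters
        have hnil : PySem.List.pyRange (off : Int) (sh : Int) = [] :=
          PySem.List.pyRange_one_eq_nil (by exact_mod_cast Nat.le_of_lt (by omega))
        rw [hnil]
        have hseg : ∀ c : String, pvSeg sh off c = [] := by
          intro c; unfold pvSeg
          have : sh - off = 0 := by omega
          rw [this]; simp
        have hfold : rest.foldl (fun com c => pvCommonPrefix com (pvSeg sh off c)) (pvSeg sh off c0) = [] := by
          rw [hseg c0]
          exact pvFold_nil rest (fun c => pvSeg sh off c)
        rw [hfold]
        simp [pvOuterA, String.ofList_toList]
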